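-- pv_equiv track=rewrite | github.com/BenderEg/TeleBotMemo | app/services/del_service.py | filter_objects
-- ===== SOURCE A (Python) =====
-- def filter_objects(objects: list, target_id: str) -> tuple:
--     target_object = None
--     filtered_objects = []
--     for ele in objects:
--         if ele['id'] == target_id:
--             target_object = ele
--         else:
--             filtered_objects.append(ele)
--     return target_object, filtered_objects
-- ===== SOURCE B (Python) =====
-- def filter_objects(objects: list, target_id: str) -> tuple:
--     filtered_objects = [e for e in objects if e['id'] != target_id]
--     target_object = next((e for e in reversed(objects) if e['id'] == target_id), None)
--     return target_object, filtered_objects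
-- ===== Notes on version B (the rewrite author's own statement) =====
-- stated objective: idiomatic
-- what changed: Replaced the single loop maintaining two accumulators by two independent scans: a comprehension keeping non-matching elements and a reversed-next() search for the last matching element.
-- outside the precondition, e.g. on filter_objects([{}], 'x'): A raises KeyError, B raises KeyError
import Mathlib
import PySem

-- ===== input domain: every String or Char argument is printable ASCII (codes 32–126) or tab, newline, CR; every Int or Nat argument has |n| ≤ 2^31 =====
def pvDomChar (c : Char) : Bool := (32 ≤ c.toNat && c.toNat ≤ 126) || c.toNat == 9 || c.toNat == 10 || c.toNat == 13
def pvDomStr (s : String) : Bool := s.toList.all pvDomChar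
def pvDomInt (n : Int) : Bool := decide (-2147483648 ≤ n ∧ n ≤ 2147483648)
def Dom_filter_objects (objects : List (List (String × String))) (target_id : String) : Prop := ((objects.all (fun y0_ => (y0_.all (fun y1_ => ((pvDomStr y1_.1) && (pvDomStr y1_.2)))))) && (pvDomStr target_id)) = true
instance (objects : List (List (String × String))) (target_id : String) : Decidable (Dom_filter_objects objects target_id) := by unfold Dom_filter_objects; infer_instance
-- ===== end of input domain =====

-- B splits A's single two-accumulator loop into two independent scans (a filter and a
-- reversed-first-match search); equivalence of return values is proved on inputs whose
-- elements all carry an 'id' key (elsewhere Python raises KeyError).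

-- ele['id'] : first match in the association list (Python dict lookup)
def pvGetId (e : List (String × String)) : Option String :=
  (e.find? (fun p => p.1 == "id")).map Prod.snd

-- ===== PORT A =====
def filter_objects (objects : List (List (String × String))) (target_id : String) : (Option (List (String × String))) × (List (List (String × String))) :=
  objects.foldl
    (fun s ele =>
      if pvGetId ele == some target_id then (some ele, s.2)
      else (s.1, s.2 ++ [ele]))
    (none, [])

-- ===== PORT B =====
def filter_objects_alt (objects : List (List (String × String))) (target_id : String) : (Option (List (String × String))) × (List (List (String × String))) :=
  let filtered := objects.filter (fun e => !(pvGetId e == some target_id))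
  let target := objects.reverse.find? (fun e => pvGetId e == some target_id)
  (target, filtered)

-- ===== PRECONDITION & SPEC =====
-- Pre_: every element has an 'id' key; on elements without it Python A (and B) raise KeyError.
def Pre_filter_objects (objects : List (List (String × String))) (target_id : String) : Prop :=
  (objects.all (fun e => (e.map Prod.fst).contains "id")) = true
instance (objects : List (List (String × String))) (target_id : String) : Decidable (Pre_filter_objects objects target_id) := by unfold Pre_filter_objects; infer_instance
def pvWitness_filter_objects : (List (List (String × String))) × String :=
  ([[("id", "1"), ("name", "a")], [("id", "2")]], "2")

def Spec_filter_objects (objects : List (List (String × String))) (target_id : String) (out : (Option (List (String × String))) × (List (List (String × String)))) : Prop := out = filter_objects_alt objects target_id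
instance (objects : List (List (String × String))) (target_id : String) (out : (Option (List (String × String))) × (List (List (String × String)))) : Decidable (Spec_filter_objects objects target_id out) := by unfold Spec_filter_objects; infer_instance

-- ===== CLAIM (what is proved, stated in full; the proofs are below) =====
def Claim_equal_filter_objects : Prop := ∀ (objects : List (List (String × String))) (target_id : String), Dom_filter_objects objects target_id → Pre_filter_objects objects target_id → Spec_filter_objects objects target_id (filter_objects objects target_id)

-- ===== LEMMAS AND PROOFS =====

-- invariant of A's loop: the fold computes B's two scans, relative to the incoming state
theorem filter_objects_fold_inv (target_id : String)
    (l : List (List (String × String))) (t : Option (List (String × String)))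
    (acc : List (List (String × String))) :
    l.foldl
      (fun s ele =>
        if pvGetId ele == some target_id then (some ele, s.2)
        else (s.1, s.2 ++ [ele]))
      (t, acc)
    = ((l.reverse.find? (fun e => pvGetId e == some target_id)).orElse (fun _ => t),
       acc ++ l.filter (fun e => !(pvGetId e == some target_id))) := by
  induction l generalizing t acc with
  | nil => simp
  | cons e l ih =>
    simp only [List.foldl_cons, List.reverse_cons, List.find?_append, List.filter_cons]
    by_cases h : (pvGetId e == some target_id) = true
    · rw [if_pos h, ih]
      cases l.reverse.find? (fun e => pvGetId e == some target_id) <;>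
        simp [Option.orElse, List.find?, h]
    · rw [if_neg h, ih]
      cases l.reverse.find? (fun e => pvGetId e == some target_id) <;>
        simp [Option.orElse, List.find?, h] at *

-- ===== VERDICT (by name: the statement is the Claim_ definition above) =====
theorem filter_objects_spec : Claim_equal_filter_objects := by
  intro objects target_id _ _
  unfold Spec_filter_objects filter_objects filter_objects_alt
  rw [filter_objects_fold_inv]
  cases objects.reverse.find? (fun e => pvGetId e == some target_id) <;>
    simp [Option.orElse]
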